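-- pv_equiv track=rewrite | github.com/SovaidKhan/Python | sum_master.py | sum_master
-- ===== SOURCE A (Python) =====
-- def MergeSort(SumArray):
--     if len(SumArray)> 1:
--         mid = len(SumArray)//2
--         L = SumArray[:mid]
--         R = SumArray[mid:]
--         MergeSort(L)
--         MergeSort(R)
--         i = 0
--         j = 0
--         k = 0
--         while i < len(L) and j < len(R):
--             if L[i] < R[j]:
--                 SumArray[k] = L[i]
--                 i += 1
--             else:
--                 SumArray[k] = R[j]
--                 j += 1
--             k += 1
--         while i < len(L):
--             SumArray[k] = L[i]
--             i +=1
--             k +=1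
--         while j < len(R):
--             SumArray[k] = R[j]
--             j +=1
--             k +=1
--     return SumArray
--
-- def sum_master(Array):
--     SumArray = []
--     for i in range(0,len(Array)-1):
--         for y in range(i,len(Array)-1):
--             try:
--                 j = Array.index(Array[i]+Array[y+1])
--                 if j >= 0:
--                     try:
--                         SumArray.index(Array[j])
--                     except ValueError:
--                         SumArray.append(Array[j])
--             except ValueError:
--                 pass
--     return MergeSort(SumArray)
-- ===== SOURCE B (Python) =====
-- def sum_master(Array):
--     result = set()
--     for t in set(Array):
--         seen = set()
--         for x in Array:
--             if t - x in seen: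
--                 result.add(t)
--                 break
--             seen.add(x)
--     return sorted(result)
-- ===== Notes on version B (the rewrite author's own statement) =====
-- stated objective: faster
-- what changed: Instead of enumerating all index pairs and calling list.index for each sum (and again for dedup), B iterates over the distinct values of the array and decides for each whether it is a sum of two elements at distinct indices by a single seen-set two-sum scan, then sorts the result set.
import Mathlib
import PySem

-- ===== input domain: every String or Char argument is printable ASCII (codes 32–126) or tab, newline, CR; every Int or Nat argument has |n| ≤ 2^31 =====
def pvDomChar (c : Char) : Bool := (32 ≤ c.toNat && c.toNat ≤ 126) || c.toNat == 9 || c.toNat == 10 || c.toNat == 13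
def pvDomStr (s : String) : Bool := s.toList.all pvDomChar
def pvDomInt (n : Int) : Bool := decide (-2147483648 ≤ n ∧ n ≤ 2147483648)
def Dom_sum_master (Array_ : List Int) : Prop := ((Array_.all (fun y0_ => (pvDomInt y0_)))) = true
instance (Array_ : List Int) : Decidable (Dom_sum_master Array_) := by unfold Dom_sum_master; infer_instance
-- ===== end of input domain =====

-- B replaces A's all-index-pairs enumeration (with list.index scans) by a per-distinct-value
-- two-sum scan over the array; the return values are proved equal.

-- ===== PORT A =====
-- merge phase of MergeSort: the three while loops as one structural recursion
def pyMerge : List Int → List Int → List Int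
  | [], r => r
  | a :: l, [] => a :: l
  | a :: l, b :: r => if a < b then a :: pyMerge l (b :: r) else b :: pyMerge (a :: l) r

-- MergeSort(SumArray): split at len//2, recurse on both halves, merge
def pyMergeSort (l : List Int) : List Int :=
  if l.length > 1 then
    pyMerge (pyMergeSort (l.take (l.length / 2))) (pyMergeSort (l.drop (l.length / 2)))
  else l
termination_by l.length
decreasing_by
  · simp; omega
  · simp; omega

-- body of A's try-block for one (i, y): j = Array.index(Array[i]+Array[y+1]);
-- if j >= 0: append Array[j] to SumArray unless SumArray.index(Array[j]) succeeds
def tryAddSum (Array_ SumArray : List Int) (i y : Int) : List Int :=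
  match PySem.List.index? Array_
      (PySem.List.pyGetD Array_ i 0 + PySem.List.pyGetD Array_ (y + 1) 0) with
  | none => SumArray          -- except ValueError: pass
  | some j =>
    if (j : Int) ≥ 0 then
      match PySem.List.index? SumArray (PySem.List.pyGetD Array_ (j : Int) 0) with
      | some _ => SumArray
      | none => SumArray ++ [PySem.List.pyGetD Array_ (j : Int) 0]
    else SumArray

def sum_master (Array_ : List Int) : List Int :=
  let n : Int := Array_.length
  let SumArray : List Int :=
    (PySem.List.pyRange 0 (n - 1)).foldl (fun SumArray i =>
      (PySem.List.pyRange i (n - 1)).foldl (fun SumArray y =>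
        tryAddSum Array_ SumArray i y) SumArray) []
  pyMergeSort SumArray

-- ===== PORT B =====
-- single-pass two-sum existence check with a 'seen' set (the inner loop with break)
def twoSumScan (t : Int) : List Int → PySem.Set Int → Bool
  | [], _ => false
  | x :: xs, seen =>
    if PySem.Set.contains seen (t - x) then true else twoSumScan t xs (seen.add x)

def sum_master_alt (Array_ : List Int) : List Int :=
  let result : PySem.Set Int :=
    (PySem.Set.ofList Array_).foldl
      (fun result t => if twoSumScan t Array_ PySem.Set.empty then PySem.Set.add result t
                       else result)
      PySem.Set.empty
  PySem.List.sorted result (fun x => x)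

-- ===== PRECONDITION & SPEC =====
def Spec_sum_master (Array_ : List Int) (out : List Int) : Prop := out = sum_master_alt Array_
instance (Array_ : List Int) (out : List Int) : Decidable (Spec_sum_master Array_ out) := by unfold Spec_sum_master; infer_instance

-- ===== CLAIM (what is proved, stated in full; the proofs are below) =====
def Claim_equal_sum_master : Prop := ∀ (Array_ : List Int), Dom_sum_master Array_ → Spec_sum_master Array_ (sum_master Array_)

-- ===== LEMMAS AND PROOFS =====

-- the accumulator each program builds before sorting
def SAcc (a : List Int) : List Int :=
  (PySem.List.pyRange 0 ((a.length : Int) - 1)).foldl (fun SumArray i =>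
    (PySem.List.pyRange i ((a.length : Int) - 1)).foldl (fun SumArray y =>
      tryAddSum a SumArray i y) SumArray) []

def SRes (a : List Int) : List Int :=
  (PySem.Set.ofList a).foldl
    (fun result t => if twoSumScan t a PySem.Set.empty then PySem.Set.add result t else result)
    PySem.Set.empty

-- the common characterisation: v is in the array and is a sum of two elements at distinct indices
def IsPairSum (a : List Int) (v : Int) : Prop :=
  v ∈ a ∧ ∃ p q : Nat, p < q ∧ q < a.length ∧ a.getD p 0 + a.getD q 0 = v

-- generic fold lemmas
theorem mem_foldl_of_step {β : Type} (g : List Int → β → List Int) (Q : β → Int → Prop)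
    (hg : ∀ acc b v, v ∈ g acc b ↔ v ∈ acc ∨ Q b v) :
    ∀ (l : List β) (acc : List Int) (v : Int),
      v ∈ l.foldl g acc ↔ v ∈ acc ∨ ∃ b ∈ l, Q b v := by
  intro l
  induction l with
  | nil => simp
  | cons b l ih =>
    intro acc v
    simp only [List.foldl_cons, ih, hg, List.mem_cons]
    constructor
    · rintro ((h | h) | ⟨b', hb', h⟩)
      · exact Or.inl h
      · exact Or.inr ⟨b, Or.inl rfl, h⟩
      · exact Or.inr ⟨b', Or.inr hb', h⟩
    · rintro (h | ⟨b', (rfl | hb'), h⟩)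
      · exact Or.inl (Or.inl h)
      · exact Or.inl (Or.inr h)
      · exact Or.inr ⟨b', hb', h⟩

theorem nodup_foldl_of_step {β : Type} (g : List Int → β → List Int)
    (hg : ∀ acc b, acc.Nodup → (g acc b).Nodup) :
    ∀ (l : List β) (acc : List Int), acc.Nodup → (l.foldl g acc).Nodup := by
  intro l
  induction l with
  | nil => exact fun _ h => h
  | cons b l ih => intro acc h; exact ih _ (hg _ _ h)

-- A's try-block equals: if the sum occurs in the array, append it unless already collected
theorem tryAddSum_eq (a acc : List Int) (i y : Int) :
    tryAddSum a acc i y =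
      (if (PySem.List.pyGetD a i 0 + PySem.List.pyGetD a (y + 1) 0) ∈ a then
        (if (PySem.List.pyGetD a i 0 + PySem.List.pyGetD a (y + 1) 0) ∈ acc then acc
         else acc ++ [PySem.List.pyGetD a i 0 + PySem.List.pyGetD a (y + 1) 0])
       else acc) := by
  unfold tryAddSum
  set s := PySem.List.pyGetD a i 0 + PySem.List.pyGetD a (y + 1) 0 with hs
  cases h : PySem.List.index? a s with
  | none =>
    have : s ∉ a := (PySem.List.index?_eq_none_iff a s).mp h
    simp [this]
  | some j =>
    obtain ⟨hk, hja, _⟩ := PySem.List.getElem_of_index?_eq_some h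
    have hsa : s ∈ a := hja ▸ List.getElem_mem hk
    have hget : PySem.List.pyGetD a (j : Int) 0 = s := by
      rw [PySem.List.pyGetD_eq_getElem a 0 (by positivity) (by exact_mod_cast hk)]
      simpa using hja
    have hj0 : ((j : Int) ≥ 0) := by positivity
    simp only [hj0, if_true, hget, hsa]
    cases hacc : PySem.List.index? acc s with
    | none =>
      have : s ∉ acc := (PySem.List.index?_eq_none_iff acc s).mp hacc
      simp [this]
    | some k =>
      obtain ⟨hk2, hacc2, _⟩ := PySem.List.getElem_of_index?_eq_some hacc
      have : s ∈ acc := hacc2 ▸ List.getElem_mem hk2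
      simp [this]

theorem mem_innerA (a : List Int) (i : Int) (acc : List Int) (v : Int) :
    v ∈ (PySem.List.pyRange i ((a.length : Int) - 1)).foldl
        (fun SumArray y => tryAddSum a SumArray i y) acc ↔
      v ∈ acc ∨ ∃ y ∈ PySem.List.pyRange i ((a.length : Int) - 1),
        (PySem.List.pyGetD a i 0 + PySem.List.pyGetD a (y + 1) 0) ∈ a ∧
        PySem.List.pyGetD a i 0 + PySem.List.pyGetD a (y + 1) 0 = v := by
  apply mem_foldl_of_step
  intro acc y v
  rw [tryAddSum_eq]
  split_ifs with h1 h2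
  · constructor
    · exact Or.inl
    · rintro (h | ⟨_, rfl⟩)
      · exact h
      · exact h2
  · simp only [List.mem_append, List.mem_singleton]
    constructor
    · rintro (h | rfl)
      · exact Or.inl h
      · exact Or.inr ⟨h1, rfl⟩
    · rintro (h | ⟨_, rfl⟩)
      · exact Or.inl h
      · exact Or.inr rfl
  · simp [h1]

theorem mem_sumArrayA (a : List Int) (v : Int) : v ∈ SAcc a ↔ IsPairSum a v := by
  unfold SAcc
  rw [mem_foldl_of_step _
      (fun i v => ∃ y ∈ PySem.List.pyRange i ((a.length : Int) - 1),
        (PySem.List.pyGetD a i 0 + PySem.List.pyGetD a (y + 1) 0) ∈ a ∧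
        PySem.List.pyGetD a i 0 + PySem.List.pyGetD a (y + 1) 0 = v)
      (fun acc i v => mem_innerA a i acc v)]
  simp only [List.not_mem_nil, false_or, PySem.List.mem_pyRange_one]
  constructor
  · rintro ⟨i, ⟨hi0, hin⟩, y, ⟨hyi, hyn⟩, hmem, hval⟩
    have hy0 : (0 : Int) ≤ y := le_trans hi0 hyi
    lift i to ℕ using hi0 with p
    lift y to ℕ using hy0 with m
    have e1 : PySem.List.pyGetD a ((p : Int)) 0 = a.getD p 0 := PySem.List.pyGetD_natCast a p 0
    have e2 : PySem.List.pyGetD a ((m : Int) + 1) 0 = a.getD (m + 1) 0 := by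
      have : ((m : Int) + 1) = ((m + 1 : ℕ) : Int) := by push_cast; ring
      rw [this, PySem.List.pyGetD_natCast]
    rw [e1, e2] at hval hmem
    exact ⟨hval ▸ hmem, p, m + 1, by omega, by omega, hval⟩
  · rintro ⟨hva, p, q, hpq, hq, hsum⟩
    refine ⟨(p : Int), ⟨by positivity, by omega⟩, ((q - 1 : ℕ) : Int), ⟨by omega, by omega⟩, ?_⟩
    have e1 : PySem.List.pyGetD a ((p : Int)) 0 = a.getD p 0 := PySem.List.pyGetD_natCast a p 0
    have e2 : PySem.List.pyGetD a (((q - 1 : ℕ) : Int) + 1) 0 = a.getD q 0 := by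
      have : (((q - 1 : ℕ) : Int) + 1) = ((q : ℕ) : Int) := by omega
      rw [this, PySem.List.pyGetD_natCast]
    rw [e1, e2]
    exact ⟨hsum ▸ hva, hsum⟩

theorem nodup_sumArrayA (a : List Int) : (SAcc a).Nodup := by
  have hin : ∀ (i : Int) (acc : List Int), acc.Nodup →
      ((PySem.List.pyRange i ((a.length : Int) - 1)).foldl
        (fun SumArray y => tryAddSum a SumArray i y) acc).Nodup := by
    intro i
    apply nodup_foldl_of_step
    intro acc y h
    rw [tryAddSum_eq]
    split_ifs with h1 h2
    · exact h
    · exact List.nodup_append.mpr ⟨h, List.nodup_singleton _, by intro z hz; simp; intro hzv; exact h2 (hzv ▸ hz)⟩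
    · exact h
  exact nodup_foldl_of_step _ (fun acc i h => hin i acc h) _ _ List.nodup_nil

theorem twoSumScan_iff (t : Int) :
    ∀ (l : List Int) (seen : PySem.Set Int),
      twoSumScan t l seen = true ↔
        ∃ q : Nat, q < l.length ∧
          ((t - l.getD q 0) ∈ (seen : List Int) ∨
            ∃ p : Nat, p < q ∧ l.getD p 0 + l.getD q 0 = t) := by
  intro l
  induction l with
  | nil =>
    intro seen
    constructor
    · intro h; simp [twoSumScan] at h
    · rintro ⟨q, hq, _⟩; simp at hq
  | cons x xs ih =>
    intro seen
    by_cases hc : PySem.Set.contains seen (t - x) = true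
    · have hmem : (t - x) ∈ (seen : List Int) := by
        simpa [PySem.Set.contains] using hc
      simp only [twoSumScan, hc, if_true]
      constructor
      · intro _
        exact ⟨0, by simp, Or.inl (by simpa using hmem)⟩
      · intro _; trivial
    · have hnm : (t - x) ∉ (seen : List Int) := by
        simpa [PySem.Set.contains] using hc
      simp only [twoSumScan, hc, Bool.false_eq_true, if_false]
      rw [ih (PySem.Set.add seen x)]
      constructor
      · rintro ⟨q, hq, hor⟩
        refine ⟨q + 1, by simp only [List.length_cons]; omega, ?_⟩
        rcases hor with hs | ⟨p, hp, hsum⟩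
        · rcases (PySem.Set.mem_add seen x _).mp hs with h' | h'
          · exact Or.inl (by simpa using h')
          · refine Or.inr ⟨0, by omega, ?_⟩
            simp only [List.getD_cons_zero, List.getD_cons_succ]
            omega
        · exact Or.inr ⟨p + 1, by omega, by simpa using hsum⟩
      · rintro ⟨q, hq, hor⟩
        cases q with
        | zero =>
          rcases hor with hs | ⟨p, hp, _⟩
          · exact absurd (by simpa using hs) hnm
          · omega
        | succ q =>
          refine ⟨q, by simpa using hq, ?_⟩
          rcases hor with hs | ⟨p, hp, hsum⟩
          · exact Or.inl ((PySem.Set.mem_add seen x _).mpr (Or.inl (by simpa using hs)))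
          · cases p with
            | zero =>
              refine Or.inl ((PySem.Set.mem_add seen x _).mpr (Or.inr ?_))
              simp only [List.getD_cons_zero, List.getD_cons_succ] at hsum ⊢
              omega
            | succ p => exact Or.inr ⟨p, by omega, by simpa using hsum⟩

theorem mem_resultB (a : List Int) (v : Int) : v ∈ SRes a ↔ IsPairSum a v := by
  unfold SRes
  rw [mem_foldl_of_step _ (fun t v => twoSumScan t a PySem.Set.empty = true ∧ v = t)
      (by intro acc t v; split_ifs with h1 <;> simp only [PySem.Set.empty] at h1 <;>
        simp [PySem.Set.mem_add, h1])]
  constructor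
  · rintro (h | ⟨t, ht, hscan, rfl⟩)
    · exact absurd h (by simp)
    · have hta : v ∈ a := (PySem.Set.mem_ofList a v).mp ht
      obtain ⟨q, hq, hor⟩ := (twoSumScan_iff v a PySem.Set.empty).mp hscan
      rcases hor with hs | ⟨p, hp, hsum⟩
      · exact absurd hs (by simp [PySem.Set.empty])
      · exact ⟨hta, p, q, hp, hq, hsum⟩
  · rintro ⟨hva, p, q, hpq, hq, hsum⟩
    refine Or.inr ⟨v, (PySem.Set.mem_ofList a v).mpr hva, ?_, rfl⟩
    exact (twoSumScan_iff v a PySem.Set.empty).mpr ⟨q, hq, Or.inr ⟨p, hpq, hsum⟩⟩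

theorem nodup_resultB (a : List Int) : (SRes a).Nodup := by
  apply nodup_foldl_of_step
  · intro acc t h
    split_ifs with h1
    · exact PySem.Set.nodup_add acc t h
    · exact h
  · exact List.nodup_nil

theorem pyMerge_perm : ∀ (l r : List Int), (pyMerge l r).Perm (l ++ r) := by
  intro l r
  fun_induction pyMerge l r with
  | case1 r => simp
  | case2 a l => simp
  | case3 a l b r h ih => exact ih.cons a
  | case4 a l b r h ih => exact (ih.cons b).trans List.perm_middle.symm

theorem mem_pyMerge (l r : List Int) (v : Int) : v ∈ pyMerge l r ↔ v ∈ l ∨ v ∈ r := by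
  rw [(pyMerge_perm l r).mem_iff]; simp

theorem pyMerge_sorted : ∀ (l r : List Int), l.Pairwise (· ≤ ·) → r.Pairwise (· ≤ ·) →
    (pyMerge l r).Pairwise (· ≤ ·) := by
  intro l r
  fun_induction pyMerge l r with
  | case1 r => intro _ hr; exact hr
  | case2 a l => intro hl _; exact hl
  | case3 a l b r h ih =>
    intro hl hr
    rw [List.pairwise_cons] at hl
    refine List.pairwise_cons.mpr ⟨?_, ih hl.2 hr⟩
    intro y hy
    rcases (mem_pyMerge _ _ _).mp hy with hyl | hyr
    · exact hl.1 y hyl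
    · rcases List.mem_cons.mp hyr with rfl | hyr'
      · omega
      · have := (List.pairwise_cons.mp hr).1 y hyr'
        omega
  | case4 a l b r h ih =>
    intro hl hr
    rw [List.pairwise_cons] at hr
    refine List.pairwise_cons.mpr ⟨?_, ih hl hr.2⟩
    intro y hy
    rcases (mem_pyMerge _ _ _).mp hy with hyl | hyr
    · rcases List.mem_cons.mp hyl with rfl | hyl'
      · omega
      · have := (List.pairwise_cons.mp hl).1 y hyl'
        omega
    · exact hr.1 y hyr

theorem pyMergeSort_perm : ∀ (l : List Int), (pyMergeSort l).Perm l := by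
  intro l
  fun_induction pyMergeSort l with
  | case1 l h ih1 ih2 =>
    exact (pyMerge_perm _ _).trans ((ih1.append ih2).trans (by simp))
  | case2 l h => exact List.Perm.refl l

theorem pyMergeSort_sorted : ∀ (l : List Int), (pyMergeSort l).Pairwise (· ≤ ·) := by
  intro l
  fun_induction pyMergeSort l with
  | case1 l h ih1 ih2 => exact pyMerge_sorted _ _ ih1 ih2
  | case2 l h =>
    match l with
    | [] => simp
    | [x] => simp
    | x :: y :: t => simp at h

-- ===== VERDICT (by name: the statement is the Claim_ definition above) =====
theorem sum_master_spec : Claim_equal_sum_master := by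
  intro a _
  show pyMergeSort (SAcc a) = PySem.List.sorted (SRes a) (fun x => x)
  have hperm : (SAcc a).Perm (SRes a) :=
    (List.perm_ext_iff_of_nodup (nodup_sumArrayA a) (nodup_resultB a)).mpr
      (fun v => (mem_sumArrayA a v).trans (mem_resultB a v).symm)
  exact (PySem.List.sorted_id_eq_of_perm_of_pairwise _ _
    ((pyMergeSort_perm _).trans hperm) (pyMergeSort_sorted _)).symm
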